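-- pv_equiv track=rewrite | github.com/blckwolf5851/Python-Algorithm | 4_AlgorithmsOnStrings/Week4 - suffixArrayTree/Week4 - suffixTreeAssign/suffix_array_long.py | equivClass
-- ===== SOURCE A (Python) =====
-- def equivClass(S,order):
--     clas = [0 for _ in range(len(S))]
--     clas[order[0]] = 0
--     for i in range(1,len(order)):
--         if S[order[i]] != S[order[i-1]]:
--             clas[order[i]] = clas[order[i-1]] + 1
--         else:
--             clas[order[i]] = clas[order[i-1]]
--     return clas
-- ===== SOURCE B (Python) =====
-- def equivClass(S, order):
--     # pass 1, right to left: suf[i] = number of character changes within order[i:]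
--     n = len(order)
--     suf = [0] * n
--     for i in range(n - 2, -1, -1):
--         suf[i] = suf[i + 1] + (S[order[i]] != S[order[i + 1]])
--     total = suf[0]
--     # pass 2: class of rank i = changes strictly before rank i = total - suf[i]
--     clas = [0] * len(S)
--     for i in range(n):
--         clas[order[i]] = total - suf[i]
--     return clas
-- ===== Notes on version B (the rewrite author's own statement) =====
-- stated objective: alternative
-- what changed: Replaces A's single forward compare-and-carry loop (each step reads the previous rank's class back out of the clas array it is writing) by two staged passes in the opposite direction: a backward pass building an auxiliary array suf of suffix change counts, then a scatter pass writing clas[order[i]] = total - suf[i], never reading clas back.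
import Mathlib
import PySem

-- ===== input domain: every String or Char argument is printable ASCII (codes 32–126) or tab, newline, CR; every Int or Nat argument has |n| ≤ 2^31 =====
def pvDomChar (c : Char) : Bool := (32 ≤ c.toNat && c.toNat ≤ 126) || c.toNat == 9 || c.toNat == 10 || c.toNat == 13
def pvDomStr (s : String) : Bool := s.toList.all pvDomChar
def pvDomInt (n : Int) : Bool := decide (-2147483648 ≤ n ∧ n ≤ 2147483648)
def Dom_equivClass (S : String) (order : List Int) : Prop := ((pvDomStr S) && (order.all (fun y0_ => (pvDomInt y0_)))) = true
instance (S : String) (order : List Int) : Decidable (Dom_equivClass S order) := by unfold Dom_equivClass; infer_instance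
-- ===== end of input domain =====

-- B replaces A's forward fused compare-and-carry loop (which reads classes back out of clas)
-- by two staged passes: a BACKWARD pass building an auxiliary suffix-change-count array suf,
-- then a scatter pass writing clas[order[i]] = total - suf[i]  (alternative decomposition, same O(n)).


-- ===== PORT A =====
-- literal transliteration of A: clas = [0 for _ in range(len(S))], clas[order[0]] = 0,
-- then for i in range(1, len(order)) write clas[order[i]] from clas[order[i-1]].
def equivClass (S : String) (order : List Int) : List Int :=
  let cs := S.toList
  let clas := (PySem.List.pyRange 0 (PySem.Str.len S) 1).map (fun _ => (0 : Int))
  let clas := PySem.List.pySetD clas (PySem.List.pyGetD order 0 0) 0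
  (PySem.List.pyRange 1 (PySem.List.len order) 1).foldl
    (fun clas i =>
      if PySem.List.pyGetD cs (PySem.List.pyGetD order i 0) ' '
           ≠ PySem.List.pyGetD cs (PySem.List.pyGetD order (i - 1) 0) ' ' then
        PySem.List.pySetD clas (PySem.List.pyGetD order i 0)
          (PySem.List.pyGetD clas (PySem.List.pyGetD order (i - 1) 0) 0 + 1)
      else
        PySem.List.pySetD clas (PySem.List.pyGetD order i 0)
          (PySem.List.pyGetD clas (PySem.List.pyGetD order (i - 1) 0) 0))
    clas

-- ===== PORT B =====
-- literal transliteration of B (Source B): suf = [0]*n; backward loop for i in range(n-2,-1,-1)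
-- sets suf[i] = suf[i+1] + (S[order[i]] != S[order[i+1]]); total = suf[0];
-- clas = [0]*len(S); forward loop sets clas[order[i]] = total - suf[i].
def equivClass_alt (S : String) (order : List Int) : List Int :=
  let cs := S.toList
  let n : Int := PySem.List.len order
  let suf := List.replicate order.length (0 : Int)
  let suf := (PySem.List.pyRange (n - 2) (-1) (-1)).foldl
    (fun suf i =>
      PySem.List.pySetD suf i
        (PySem.List.pyGetD suf (i + 1) 0 +
          (if PySem.List.pyGetD cs (PySem.List.pyGetD order i 0) ' '
               ≠ PySem.List.pyGetD cs (PySem.List.pyGetD order (i + 1) 0) ' ' then 1 else 0)))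
    suf
  let total := PySem.List.pyGetD suf 0 0
  let clas := List.replicate cs.length (0 : Int)
  (PySem.List.pyRange 0 n 1).foldl
    (fun clas i =>
      PySem.List.pySetD clas (PySem.List.pyGetD order i 0)
        (total - PySem.List.pyGetD suf i 0))
    clas

-- ===== PRECONDITION & SPEC =====
-- Pre_ excludes exactly the inputs where A raises IndexError: empty order (clas[order[0]]),
-- and any order entry that is not a valid Python index into S.
def Pre_equivClass (S : String) (order : List Int) : Prop :=
  order ≠ [] ∧ ∀ x ∈ order, -(S.toList.length : Int) ≤ x ∧ x < (S.toList.length : Int)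
instance (S : String) (order : List Int) : Decidable (Pre_equivClass S order) := by
  unfold Pre_equivClass; infer_instance
def pvWitness_equivClass : String × List Int := ("ab", [0, 1])

def Spec_equivClass (S : String) (order : List Int) (out : List Int) : Prop :=
  out = equivClass_alt S order
instance (S : String) (order : List Int) (out : List Int) : Decidable (Spec_equivClass S order out) := by
  unfold Spec_equivClass; infer_instance

-- ===== CLAIM (what is proved, stated in full; the proofs are below) =====
def Claim_equal_equivClass : Prop := ∀ (S : String) (order : List Int),
  Dom_equivClass S order → Pre_equivClass S order → Spec_equivClass S order (equivClass S order)

-- ===== LEMMAS AND PROOFS =====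

-- common reference form both ports are reduced to: scatter of the running prefix sums
-- of the adjacent-difference flags along order
def pvGather (cs : List Char) (order : List Int) : List Int :=
  let chars := order.map (fun i => PySem.List.pyGetD cs i ' ')
  let flags := ((chars.drop 1).zip chars).map (fun p => if p.1 ≠ p.2 then (1 : Int) else 0)
  let ranks := List.scanl (· + ·) (0 : Int) flags
  (order.zip ranks).foldl (fun clas p => PySem.List.pySetD clas p.1 p.2)
    (List.replicate cs.length (0 : Int))

-- the same flags in B's orientation (pair (order[j], order[j+1]))
def pvFlags (cs : List Char) (order : List Int) : List Int :=
  (order.zip (order.drop 1)).map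
    (fun p => if PySem.List.pyGetD cs p.1 ' ' ≠ PySem.List.pyGetD cs p.2 ' ' then (1 : Int) else 0)

theorem pv_flags_length (cs : List Char) (order : List Int) :
    (pvFlags cs order).length = order.length - 1 := by
  simp [pvFlags]

theorem pv_flags_eq (cs : List Char) (order : List Int) :
    (((order.map (fun i => PySem.List.pyGetD cs i ' ')).drop 1).zip
        (order.map (fun i => PySem.List.pyGetD cs i ' '))).map
      (fun p => if p.1 ≠ p.2 then (1 : Int) else 0)
      = pvFlags cs order := by
  rw [← List.map_drop, List.zip_map, List.map_map, ← List.zip_swap, List.map_map]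
  unfold pvFlags
  refine List.map_congr_left (fun p _ => ?_)
  simp only [Function.comp_apply]
  exact if_congr ne_comm rfl rfl

-- reading back the position just written (valid Python index, possibly negative)
theorem pv_getD_setD_self {α : Type} (xs : List α) (i : Int) (v d : α)
    (h1 : -(xs.length : Int) ≤ i) (h2 : i < (xs.length : Int)) :
    PySem.List.pyGetD (PySem.List.pySetD xs i v) i d = v := by
  simp only [PySem.List.pyGetD, PySem.List.pySetD, PySem.List.pyGet?, PySem.List.pySet?,
    PySem.List.pyIdx?]
  by_cases h0 : 0 ≤ i
  · have hlt : i.toNat < xs.length := by omega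
    simp [h0, h2, List.length_set, hlt]
  · have hk : xs.length - (-i).toNat < xs.length := by omega
    simp [h0, h1, List.length_set, hk]

-- an index fold over adjacent entries is a fold over the list zipped with its tail
theorem pv_range_pair_foldl {α β : Type} (f : β → α → α → β) (d : α) :
    ∀ (xs : List α) (init : β),
    (List.range (xs.length - 1)).foldl
        (fun acc k => f acc (xs.getD k d) (xs.getD (k + 1) d)) init
      = (xs.zip (xs.drop 1)).foldl (fun acc p => f acc p.1 p.2) init := by
  intro xs
  induction xs with
  | nil => simp
  | cons x ys ih =>
    intro init
    cases ys with
    | nil => simp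
    | cons y t =>
      have h : (x :: y :: t).length - 1 = t.length + 1 := by simp
      rw [h, List.range_succ_eq_map, List.foldl_cons, List.foldl_map]
      have h2 : (y :: t).length - 1 = t.length := by simp
      have h3 := ih (f init ((x :: y :: t).getD 0 d) ((x :: y :: t).getD 1 d))
      rw [h2] at h3
      simp only [List.getD_cons_succ, Nat.succ_eq_add_one] at h3 ⊢
      simpa using h3

-- every scanl result starts with its seed
theorem pv_scanl_head_drop (l : List Int) (b : Int) :
    List.scanl (· + ·) b l = b :: (List.scanl (· + ·) b l).drop 1 := by
  cases l <;> simp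

-- the scatter pairs processed after the head, as a structural recursion
def pvBPairs (cs : List Char) : Int → Int → List Int → List (Int × Int)
  | _, _, [] => []
  | prev, r, c :: t =>
    let r' := r + (if PySem.List.pyGetD cs c ' ' ≠ PySem.List.pyGetD cs prev ' ' then 1 else 0)
    (c, r') :: pvBPairs cs c r' t

theorem pv_zip_scanl_eq_bpairs (cs : List Char) :
    ∀ (os : List Int) (prev r : Int),
    os.zip ((List.scanl (· + ·) r
        (((os.map (fun i => PySem.List.pyGetD cs i ' ')).zip
          ((prev :: os).map (fun i => PySem.List.pyGetD cs i ' '))).map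
            (fun p => if p.1 ≠ p.2 then (1 : Int) else 0))).drop 1)
      = pvBPairs cs prev r os := by
  intro os
  induction os with
  | nil => intro prev r; simp [pvBPairs]
  | cons c t ih =>
    intro prev r
    simp only [List.map_cons, List.zip_cons_cons, List.scanl_cons, List.drop_succ_cons,
      List.drop_zero, pvBPairs]
    rw [pv_scanl_head_drop, List.zip_cons_cons]
    have h2 := ih c (r + if PySem.List.pyGetD cs c ' ' ≠ PySem.List.pyGetD cs prev ' ' then 1 else 0)
    simp only [List.map_cons] at h2
    rw [h2]

-- A's carry loop and the scatter of prefix sums walk through identical states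
theorem pv_main (cs : List Char) :
    ∀ (os : List Int) (prev r : Int) (clas : List Int),
    clas.length = cs.length →
    (-(cs.length : Int) ≤ prev ∧ prev < (cs.length : Int)) →
    (∀ x ∈ os, -(cs.length : Int) ≤ x ∧ x < (cs.length : Int)) →
    PySem.List.pyGetD clas prev 0 = r →
    ((prev :: os).zip os).foldl
        (fun clas p =>
          if PySem.List.pyGetD cs p.2 ' ' ≠ PySem.List.pyGetD cs p.1 ' ' then
            PySem.List.pySetD clas p.2 (PySem.List.pyGetD clas p.1 0 + 1)
          else
            PySem.List.pySetD clas p.2 (PySem.List.pyGetD clas p.1 0)) clas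
      = (pvBPairs cs prev r os).foldl
          (fun clas p => PySem.List.pySetD clas p.1 p.2) clas := by
  intro os
  induction os with
  | nil => intro prev r clas _ _ _ _; simp [pvBPairs]
  | cons c t ih =>
    intro prev r clas hlen hprev hos hread
    have hc := hos c (by simp)
    have hstep :
        (if PySem.List.pyGetD cs c ' ' ≠ PySem.List.pyGetD cs prev ' ' then
            PySem.List.pySetD clas c (PySem.List.pyGetD clas prev 0 + 1)
          else
            PySem.List.pySetD clas c (PySem.List.pyGetD clas prev 0))
        = PySem.List.pySetD clas c
            (r + if PySem.List.pyGetD cs c ' ' ≠ PySem.List.pyGetD cs prev ' ' then 1 else 0) := by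
      rw [hread]
      split_ifs <;> simp [Int.add_comm r]
    simp only [List.zip_cons_cons, pvBPairs, List.foldl_cons]
    rw [hstep]
    exact ih c _ _
      (by rw [PySem.List.length_pySetD]; exact hlen)
      hc
      (fun x hx => hos x (by simp [hx]))
      (pv_getD_setD_self clas c _ 0 (by omega) (by omega))

-- A reduces to the common scatter form
theorem pv_A_eq_gather (S : String) (order : List Int)
    (hne : order ≠ [])
    (hbound : ∀ x ∈ order, -(S.toList.length : Int) ≤ x ∧ x < (S.toList.length : Int)) :
    equivClass S order = pvGather S.toList order := by
  cases order with
  | nil => exact absurd rfl hne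
  | cons o0 os =>
    simp only [equivClass, pvGather]
    have hbase : (PySem.List.pyRange 0 (PySem.Str.len S) 1).map (fun _ => (0 : Int))
        = List.replicate S.toList.length (0 : Int) := by
      simp [PySem.Str.len_eq, PySem.List.pyRange_one, List.map_map, Function.comp_def,
        List.map_const']
    have ho0 := hbound o0 (by simp)
    have hread : PySem.List.pyGetD
        (PySem.List.pySetD (List.replicate S.toList.length (0 : Int)) o0 0) o0 0 = 0 := by
      refine pv_getD_setD_self _ o0 0 0 ?_ ?_ <;>
        simp only [List.length_replicate] <;> [exact ho0.1; exact ho0.2]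
    have hfoldA : ∀ (init : List Int),
        (PySem.List.pyRange 1 (PySem.List.len (o0 :: os)) 1).foldl
          (fun clas i =>
            if PySem.List.pyGetD S.toList (PySem.List.pyGetD (o0 :: os) i 0) ' '
                 ≠ PySem.List.pyGetD S.toList (PySem.List.pyGetD (o0 :: os) (i - 1) 0) ' ' then
              PySem.List.pySetD clas (PySem.List.pyGetD (o0 :: os) i 0)
                (PySem.List.pyGetD clas (PySem.List.pyGetD (o0 :: os) (i - 1) 0) 0 + 1)
            else
              PySem.List.pySetD clas (PySem.List.pyGetD (o0 :: os) i 0)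
                (PySem.List.pyGetD clas (PySem.List.pyGetD (o0 :: os) (i - 1) 0) 0)) init
        = ((o0 :: os).zip os).foldl
            (fun clas p =>
              if PySem.List.pyGetD S.toList p.2 ' ' ≠ PySem.List.pyGetD S.toList p.1 ' ' then
                PySem.List.pySetD clas p.2 (PySem.List.pyGetD clas p.1 0 + 1)
              else
                PySem.List.pySetD clas p.2 (PySem.List.pyGetD clas p.1 0)) init := by
      intro init
      rw [PySem.List.pyRange_one, List.foldl_map]
      have hn : ((PySem.List.len (o0 :: os) : Int) - 1).toNat = (o0 :: os).length - 1 := by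
        simp only [PySem.List.len]; omega
      rw [hn]
      have hb : (fun (clas : List Int) (k : Nat) =>
            if PySem.List.pyGetD S.toList (PySem.List.pyGetD (o0 :: os) (1 + (k : Int)) 0) ' '
                 ≠ PySem.List.pyGetD S.toList (PySem.List.pyGetD (o0 :: os) (1 + (k : Int) - 1) 0) ' ' then
              PySem.List.pySetD clas (PySem.List.pyGetD (o0 :: os) (1 + (k : Int)) 0)
                (PySem.List.pyGetD clas (PySem.List.pyGetD (o0 :: os) (1 + (k : Int) - 1) 0) 0 + 1)
            else
              PySem.List.pySetD clas (PySem.List.pyGetD (o0 :: os) (1 + (k : Int)) 0)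
                (PySem.List.pyGetD clas (PySem.List.pyGetD (o0 :: os) (1 + (k : Int) - 1) 0) 0))
          = (fun (clas : List Int) (k : Nat) =>
            if PySem.List.pyGetD S.toList ((o0 :: os).getD (k + 1) 0) ' '
                 ≠ PySem.List.pyGetD S.toList ((o0 :: os).getD k 0) ' ' then
              PySem.List.pySetD clas ((o0 :: os).getD (k + 1) 0)
                (PySem.List.pyGetD clas ((o0 :: os).getD k 0) 0 + 1)
            else
              PySem.List.pySetD clas ((o0 :: os).getD (k + 1) 0)
                (PySem.List.pyGetD clas ((o0 :: os).getD k 0) 0)) := by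
        funext clas k
        have e1 : PySem.List.pyGetD (o0 :: os) (1 + (k : Int)) 0 = (o0 :: os).getD (k + 1) 0 := by
          rw [show (1 : Int) + (k : Int) = ((k + 1 : Nat) : Int) by omega,
            PySem.List.pyGetD_natCast]
        have e2 : PySem.List.pyGetD (o0 :: os) (1 + (k : Int) - 1) 0 = (o0 :: os).getD k 0 := by
          rw [show (1 : Int) + (k : Int) - 1 = ((k : Nat) : Int) by omega,
            PySem.List.pyGetD_natCast]
        rw [e1, e2]
      rw [hb]
      exact pv_range_pair_foldl
        (fun clas a b =>
          if PySem.List.pyGetD S.toList b ' ' ≠ PySem.List.pyGetD S.toList a ' ' then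
            PySem.List.pySetD clas b (PySem.List.pyGetD clas a 0 + 1)
          else
            PySem.List.pySetD clas b (PySem.List.pyGetD clas a 0)) 0 (o0 :: os) init
    have hlen1 : (PySem.List.pySetD (List.replicate S.toList.length (0 : Int)) o0 0).length
        = S.toList.length := by
      rw [PySem.List.length_pySetD, List.length_replicate]
    have hos : ∀ x ∈ os, -(S.toList.length : Int) ≤ x ∧ x < (S.toList.length : Int) :=
      fun x hx => hbound x (by simp [hx])
    rw [hbase, PySem.List.pyGetD_zero_cons, hfoldA,
      pv_main S.toList os o0 0 _ hlen1 ho0 hos hread]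
    have hdrop : ((o0 :: os).map (fun i => PySem.List.pyGetD S.toList i ' ')).drop 1
        = os.map (fun i => PySem.List.pyGetD S.toList i ' ') := by simp
    rw [hdrop, pv_scanl_head_drop, List.zip_cons_cons, List.foldl_cons,
      pv_zip_scanl_eq_bpairs S.toList os o0 0]

-- entry k of scanl (+) b l is b plus the sum of the first k entries
theorem pv_scanl_getD (l : List Int) : ∀ (k : Nat) (b : Int), k ≤ l.length →
    (List.scanl (· + ·) b l).getD k 0 = b + (l.take k).sum := by
  induction l with
  | nil => intro k b hk; obtain rfl := Nat.le_zero.mp hk; simp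
  | cons x t ih =>
    intro k b hk
    cases k with
    | zero => simp
    | succ k =>
      simp only [List.scanl_cons, List.getD_cons_succ, List.take_succ_cons, List.sum_cons]
      rw [ih k (b + x) (by simpa using hk)]
      ring

-- a fold over range indices reading two parallel lists is a fold over their zip
theorem pv_range_zip_foldl {α β γ : Type} (da : α) (db : β) (f : γ → α → β → γ) :
    ∀ (xs : List α) (ys : List β), xs.length = ys.length → ∀ (init : γ),
    (List.range xs.length).foldl (fun acc k => f acc (xs.getD k da) (ys.getD k db)) init
      = (xs.zip ys).foldl (fun acc p => f acc p.1 p.2) init := by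
  intro xs
  induction xs with
  | nil => intro ys _ init; simp
  | cons x t ih =>
    intro ys hlen init
    cases ys with
    | nil => simp at hlen
    | cons y u =>
      simp only [List.length_cons, List.range_succ_eq_map, List.foldl_cons, List.foldl_map,
        List.getD_cons_zero, List.getD_cons_succ, List.zip_cons_cons, Nat.succ_eq_add_one]
      exact ih u (by simpa using hlen) (f init x y)

-- the backward pass fills suf with the suffix sums of the flags
theorem pv_suf_fold (cs : List Char) (order : List Int) :
    ∀ (m : Nat), m ≤ order.length - 1 →
    (List.range m).foldr
      (fun (k : Nat) (suf : List Int) =>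
        PySem.List.pySetD suf (k : Int)
          (PySem.List.pyGetD suf ((k : Int) + 1) 0 +
            (if PySem.List.pyGetD cs (PySem.List.pyGetD order (k : Int) 0) ' '
                 ≠ PySem.List.pyGetD cs (PySem.List.pyGetD order ((k : Int) + 1) 0) ' '
             then 1 else 0)))
      ((List.range order.length).map
        (fun j => if m ≤ j then ((pvFlags cs order).drop j).sum else 0))
      = (List.range order.length).map (fun j => ((pvFlags cs order).drop j).sum) := by
  intro m
  induction m with
  | zero => intro _; simp
  | succ m ih =>
    intro hm
    have hm' : m ≤ order.length - 1 := by omega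
    have hN : m + 1 < order.length := by omega
    have hmf : m < (pvFlags cs order).length := by rw [pv_flags_length]; omega
    have hstep :
        (PySem.List.pySetD
          ((List.range order.length).map
            (fun j => if m + 1 ≤ j then ((pvFlags cs order).drop j).sum else 0))
          (m : Int)
          (PySem.List.pyGetD
            ((List.range order.length).map
              (fun j => if m + 1 ≤ j then ((pvFlags cs order).drop j).sum else 0))
            ((m : Int) + 1) 0 +
            (if PySem.List.pyGetD cs (PySem.List.pyGetD order (m : Int) 0) ' '
                 ≠ PySem.List.pyGetD cs (PySem.List.pyGetD order ((m : Int) + 1) 0) ' '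
             then 1 else 0)))
        = (List.range order.length).map
            (fun j => if m ≤ j then ((pvFlags cs order).drop j).sum else 0) := by
      have hget : PySem.List.pyGetD
          ((List.range order.length).map
            (fun j => if m + 1 ≤ j then ((pvFlags cs order).drop j).sum else 0))
          ((m : Int) + 1) 0 = ((pvFlags cs order).drop (m + 1)).sum := by
        rw [show ((m : Int) + 1) = ((m + 1 : Nat) : Int) by omega, PySem.List.pyGetD_natCast,
          PySem.List.getD_map_range _ _ _ _ hN]
        simp
      have hflag :
          (if PySem.List.pyGetD cs (PySem.List.pyGetD order (m : Int) 0) ' '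
               ≠ PySem.List.pyGetD cs (PySem.List.pyGetD order ((m : Int) + 1) 0) ' '
           then (1 : Int) else 0) = (pvFlags cs order).getD m 0 := by
        rw [List.getD_eq_getElem _ _ hmf]
        unfold pvFlags
        rw [List.getElem_map, List.getElem_zip, List.getElem_drop]
        rw [show ((m : Int) + 1) = ((m + 1 : Nat) : Int) by omega,
          PySem.List.pyGetD_natCast, PySem.List.pyGetD_natCast,
          List.getD_eq_getElem _ _ (by omega : m < order.length),
          List.getD_eq_getElem _ _ (by omega : m + 1 < order.length)]
        simp [Nat.add_comm]
      rw [hget, hflag, PySem.List.pySetD_natCast]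
      have hval : ((pvFlags cs order).drop (m + 1)).sum + (pvFlags cs order).getD m 0
          = ((pvFlags cs order).drop m).sum := by
        rw [List.getD_eq_getElem _ _ hmf,
          List.drop_eq_getElem_cons hmf, List.sum_cons]
        ring
      rw [hval]
      refine List.ext_getElem (by simp) ?_
      intro j hj1 hj2
      simp only [List.getElem_set, List.getElem_map, List.getElem_range] at hj1 hj2 ⊢
      by_cases hjm : m = j
      · subst hjm; simp
      · rw [if_neg hjm]
        have h1 : m + 1 ≤ j ↔ m ≤ j := by omega
        simp [h1]
    rw [List.range_succ, List.foldr_append, List.foldr_cons, List.foldr_nil, hstep]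
    exact ih hm'

-- B reduces to the common scatter form
theorem pv_B_eq_gather (S : String) (order : List Int) (hne : order ≠ []) :
    equivClass_alt S order = pvGather S.toList order := by
  have hN : 0 < order.length := List.length_pos_of_ne_nil hne
  have hfl : (pvFlags S.toList order).length = order.length - 1 := pv_flags_length _ _
  simp only [equivClass_alt, pvGather]
  rw [pv_flags_eq]
  -- the initial suf = [0]*n is the m = n-1 stage of the suffix array
  have hbase : List.replicate order.length (0 : Int)
      = (List.range order.length).map
          (fun j => if order.length - 1 ≤ j then ((pvFlags S.toList order).drop j).sum else 0) := by
    refine ((List.eq_replicate_iff).mpr ⟨by simp, ?_⟩).symm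
    intro b hb
    obtain ⟨j, hj, rfl⟩ := List.mem_map.mp hb
    have hj' := List.mem_range.mp hj
    by_cases h : order.length - 1 ≤ j
    · have : j = order.length - 1 := by omega
      subst this
      rw [if_pos h, List.drop_of_length_le (by omega), List.sum_nil]
    · rw [if_neg h]
  -- the countdown range is the reverse of an ascending one
  have hcount : PySem.List.pyRange ((PySem.List.len order) - 2) (-1) (-1)
      = (PySem.List.pyRange 0 ((order.length : Int) - 1) 1).reverse := by
    rw [PySem.List.pyRange_neg_one_eq_reverse]
    simp only [PySem.List.len]
    norm_num
    congr 1
    ring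
  rw [hcount, List.foldl_reverse, PySem.List.pyRange_one,
    show (((order.length : Int) - 1) - 0).toNat = order.length - 1 by omega,
    List.foldr_map, hbase]
  simp only [zero_add]
  rw [pv_suf_fold S.toList order (order.length - 1) (le_refl _)]
  -- total = suf[0] = sum of all flags
  have htotal : PySem.List.pyGetD
      ((List.range order.length).map (fun j => ((pvFlags S.toList order).drop j).sum)) 0 0
      = (pvFlags S.toList order).sum := by
    rw [PySem.List.pyGetD_ofNat', PySem.List.getD_map_range _ _ _ _ hN, List.drop_zero]
  simp only [htotal]
  -- the scatter loop over range(n) as a fold over order zipped with the prefix sums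
  rw [PySem.List.pyRange_one,
    show ((PySem.List.len order : Int) - 0).toNat = order.length by
      simp [PySem.List.len],
    List.foldl_map]
  simp only [zero_add, PySem.List.pyGetD_natCast]
  rw [PySem.List.foldl_congr_mem _ _
      (fun clas (k : Nat) =>
        PySem.List.pySetD clas (order.getD k 0)
          ((List.scanl (· + ·) (0 : Int) (pvFlags S.toList order)).getD k 0)) _
      (by
        intro acc k hk
        have hk' := List.mem_range.mp hk
        rw [PySem.List.getD_map_range _ _ _ _ hk']
        beta_reduce
        rw [pv_scanl_getD _ k 0 (by omega)]
        have hs := List.sum_take_add_sum_drop (pvFlags S.toList order) k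
        congr 1
        omega)]
  exact pv_range_zip_foldl 0 0 (fun acc a b => PySem.List.pySetD acc a b) order _
    (by rw [List.length_scanl, hfl]; omega) _

-- ===== VERDICT (by name: the statement is the Claim_ definition above) =====
theorem equivClass_spec : Claim_equal_equivClass := by
  intro S order _ hpre
  obtain ⟨hne, hbound⟩ := hpre
  unfold Spec_equivClass
  rw [pv_A_eq_gather S order hne hbound, pv_B_eq_gather S order hne]
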